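-- pv_equiv track=rewrite | github.com/LeHuyHongNhat/Python-PTIT | Py02056_SoThuanNghichLonNhatTrongMaTran.py | find_max_r
-- ===== SOURCE A (Python) =====
-- def tn(x):
--     if len(x) < 2:
--         return False
--     return x == x[::-1]
--
-- def find_max_r(mtr):
--     max_pr = -1
--     poss = []
--
--     for i, row in enumerate(mtr):
--         for j, value in enumerate(row):
--             if tn(str(value)):
--                 if value > max_pr:
--                     max_pr = value
--                     poss = [(i, j)]
--                 elif value == max_pr:
--                     poss.append((i, j))
--
--     return max_pr, poss
-- ===== SOURCE B (Python) =====
-- def tn(x):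
--     if len(x) < 2:
--         return False
--     return x == x[::-1]
--
-- def find_max_r(mtr):
--     max_pr = max([-1] + [v for row in mtr for v in row if tn(str(v))])
--     poss = [(i, j) for i, row in enumerate(mtr)
--                    for j, v in enumerate(row)
--                    if tn(str(v)) and v == max_pr]
--     return max_pr, poss
-- ===== Notes on version B (the rewrite author's own statement) =====
-- stated objective: simpler
-- what changed: Replaces the single stateful scan (running max with position-list resets/appends) by two stateless passes: first the maximum palindromic value via max with a -1 sentinel, then one comprehension collecting all row-major positions equal to it.
import Mathlib
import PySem

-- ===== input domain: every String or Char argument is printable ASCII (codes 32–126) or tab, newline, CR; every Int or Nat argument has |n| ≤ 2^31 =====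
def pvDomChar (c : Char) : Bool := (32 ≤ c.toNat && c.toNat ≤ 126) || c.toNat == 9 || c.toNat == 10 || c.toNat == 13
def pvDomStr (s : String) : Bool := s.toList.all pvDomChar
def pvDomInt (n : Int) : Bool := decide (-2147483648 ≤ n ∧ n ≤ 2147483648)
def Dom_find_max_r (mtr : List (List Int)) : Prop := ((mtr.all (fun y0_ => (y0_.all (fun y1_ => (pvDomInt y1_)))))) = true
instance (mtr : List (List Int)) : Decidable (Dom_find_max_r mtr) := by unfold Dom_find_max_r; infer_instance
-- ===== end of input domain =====

-- B replaces A's single stateful scan by two stateless passes (max with a -1 sentinel, then a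
-- comprehension collecting the positions); objective: simpler, same cost.

-- ===== PORT A =====
def tn (x : String) : Bool :=
  if PySem.Str.len x < 2 then false
  else
    match PySem.Str.slice? x none none (-1) with
    | some r => x == r
    | none => false

def find_max_r (mtr : List (List Int)) : Int × (List (Int × Int)) :=
  (PySem.List.enumerate mtr).foldl
    (fun st p =>
      (PySem.List.enumerate p.2).foldl
        (fun (st2 : Int × List (Int × Int)) q =>
          if tn (PySem.Int.toStr q.2) then
            if q.2 > st2.1 then (q.2, [(p.1, q.1)])
            else if q.2 == st2.1 then (st2.1, st2.2 ++ [(p.1, q.1)])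
            else st2
          else st2)
        st)
    ((-1 : Int), ([] : List (Int × Int)))

-- ===== PORT B =====
def find_max_r_alt (mtr : List (List Int)) : Int × (List (Int × Int)) :=
  let vals := mtr.flatMap (fun row => row.filter (fun v => tn (PySem.Int.toStr v)))
  let max_pr := (PySem.List.max? ((-1 : Int) :: vals) (fun y => y)).getD (-1)
  let poss := (PySem.List.enumerate mtr).flatMap (fun p =>
      ((PySem.List.enumerate p.2).filter
          (fun q => tn (PySem.Int.toStr q.2) && q.2 == max_pr)).map
        (fun q => (p.1, q.1)))
  (max_pr, poss)

-- ===== PRECONDITION & SPEC =====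
def Spec_find_max_r (mtr : List (List Int)) (out : Int × (List (Int × Int))) : Prop := out = find_max_r_alt mtr
instance (mtr : List (List Int)) (out : Int × (List (Int × Int))) : Decidable (Spec_find_max_r mtr out) := by unfold Spec_find_max_r; infer_instance

-- ===== CLAIM (what is proved, stated in full; the proofs are below) =====
def Claim_equal_find_max_r : Prop := ∀ (mtr : List (List Int)), Dom_find_max_r mtr → Spec_find_max_r mtr (find_max_r mtr)

-- ===== LEMMAS AND PROOFS =====

def pal (v : Int) : Bool := tn (PySem.Int.toStr v)

def pvStep (st : Int × List (Int × Int)) (pv : (Int × Int) × Int) : Int × List (Int × Int) :=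
  if pal pv.2 then
    if pv.2 > st.1 then (pv.2, [pv.1])
    else if pv.2 == st.1 then (st.1, st.2 ++ [pv.1])
    else st
  else st

def pvMax (L : List ((Int × Int) × Int)) (m : Int) : Int :=
  L.foldl (fun a pv => if pal pv.2 then max a pv.2 else a) m

def pvPos (L : List ((Int × Int) × Int)) (M : Int) : List (Int × Int) :=
  (L.filter (fun pv => pal pv.2 && pv.2 == M)).map (·.1)

def pvL (mtr : List (List Int)) : List ((Int × Int) × Int) :=
  (PySem.List.enumerate mtr).flatMap
    (fun p => (PySem.List.enumerate p.2).map (fun q => ((p.1, q.1), q.2)))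

lemma pv_le_max (L : List ((Int × Int) × Int)) (m : Int) : m ≤ pvMax L m := by
  induction L generalizing m with
  | nil => simp [pvMax]
  | cons pv L ih =>
    simp only [pvMax, List.foldl_cons] at *
    exact le_trans (by split <;> simp) (ih _)

lemma pv_loop (L : List ((Int × Int) × Int)) (m : Int) (poss : List (Int × Int)) :
    L.foldl pvStep (m, poss)
      = (pvMax L m, (if m = pvMax L m then poss else []) ++ pvPos L (pvMax L m)) := by
  induction L generalizing m poss with
  | nil => simp [pvMax, pvPos]
  | cons pv L ih =>
    have hmaxc : pvMax (pv :: L) m = pvMax L (if pal pv.2 then max m pv.2 else m) := rfl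
    by_cases hp : pal pv.2
    · rcases lt_trichotomy pv.2 m with hv | hv | hv
      · -- v < m : state unchanged, element never collected
        have hstep : pvStep (m, poss) pv = (m, poss) := by
          simp only [pvStep, hp, if_true]
          rw [if_neg (by omega), if_neg (by simp; omega)]
        have hM : pvMax (pv :: L) m = pvMax L m := by
          rw [hmaxc, if_pos hp, max_eq_left hv.le]
        have hne : (pv.2 == pvMax L m) = false := by
          have := pv_le_max L m; simp; omega
        rw [List.foldl_cons, hstep, ih, hM]
        simp [pvPos, hne]
      · -- v = m : appended
        have hstep : pvStep (m, poss) pv = (m, poss ++ [pv.1]) := by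
          simp only [pvStep, hp, if_true]
          rw [if_neg (by omega), if_pos (by simp [hv])]
        have hM : pvMax (pv :: L) m = pvMax L m := by
          rw [hmaxc, if_pos hp, hv, max_self]
        rw [List.foldl_cons, hstep, ih, hM]
        by_cases hmM : m = pvMax L m
        · have hv2 : (pv.2 == pvMax L m) = true := by rw [beq_iff_eq, hv]; exact hmM
          have hpos : pvPos (pv :: L) (pvMax L m) = pv.1 :: pvPos L (pvMax L m) := by
            simp [pvPos, hp, hv2]
          rw [hpos, if_pos hmM, if_pos hmM]
          simp
        · have hv2 : (pv.2 == pvMax L m) = false := by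
            rw [hv]; simp only [beq_eq_false_iff_ne]; exact hmM
          have hpos : pvPos (pv :: L) (pvMax L m) = pvPos L (pvMax L m) := by
            simp [pvPos, hv2]
          rw [hpos, if_neg hmM, if_neg hmM]
      · -- v > m : reset
        have hstep : pvStep (m, poss) pv = (pv.2, [pv.1]) := by
          simp only [pvStep, hp, if_true]
          rw [if_pos (by omega)]
        have hM : pvMax (pv :: L) m = pvMax L pv.2 := by
          rw [hmaxc, if_pos hp, max_eq_right hv.le]
        have hmne : ¬ (m = pvMax L pv.2) := by
          have := pv_le_max L pv.2; omega
        rw [List.foldl_cons, hstep, ih, hM]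
        rw [if_neg hmne]
        by_cases hvM : pv.2 = pvMax L pv.2
        · have hv2 : (pv.2 == pvMax L pv.2) = true := by rw [beq_iff_eq]; exact hvM
          have hpos : pvPos (pv :: L) (pvMax L pv.2) = pv.1 :: pvPos L (pvMax L pv.2) := by
            simp [pvPos, hp, hv2]
          rw [hpos, if_pos hvM]
          simp
        · have hv2 : (pv.2 == pvMax L pv.2) = false := by
            simp only [beq_eq_false_iff_ne]; exact hvM
          have hpos : pvPos (pv :: L) (pvMax L pv.2) = pvPos L (pvMax L pv.2) := by
            simp [pvPos, hv2]
          rw [hpos, if_neg hvM]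
    · -- not a palindrome: skipped
      have hp' : pal pv.2 = false := by simpa using hp
      have hstep : pvStep (m, poss) pv = (m, poss) := by simp [pvStep, hp']
      have hM : pvMax (pv :: L) m = pvMax L m := by rw [hmaxc, if_neg hp]
      rw [List.foldl_cons, hstep, ih, hM]
      simp [pvPos, hp']

lemma pv_foldl_flatMap {α β γ : Type} (f : α → List β) (g : γ → β → γ) :
    ∀ (l : List α) (init : γ), (l.flatMap f).foldl g init = l.foldl (fun a x => (f x).foldl g a) init := by
  intro l
  induction l with
  | nil => intro init; simp
  | cons x l ih => intro init; simp [List.foldl_append, ih]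

lemma pv_bridgeA (mtr : List (List Int)) :
    find_max_r mtr = (pvL mtr).foldl pvStep ((-1 : Int), ([] : List (Int × Int))) := by
  rw [pvL, pv_foldl_flatMap]
  unfold find_max_r
  apply PySem.List.foldl_congr_mem
  intro acc p _
  rw [List.foldl_map]
  rfl

lemma pv_enum_filter_map_snd (p : Int → Bool) :
    ∀ (xs : List Int) (s : Int),
      ((PySem.List.enumerate xs s).filter (fun q => p q.2)).map (·.2) = xs.filter p := by
  intro xs
  induction xs with
  | nil => intro s; simp [PySem.List.enumerate_nil]
  | cons x xs ih =>
    intro s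
    simp only [PySem.List.enumerate_cons, List.filter_cons]
    by_cases hx : p x <;> simp [hx, ih]

lemma pv_vals_bridge (mtr : List (List Int)) :
    ((pvL mtr).filter (fun pv => pal pv.2)).map (·.2)
      = mtr.flatMap (fun row => row.filter (fun v => pal v)) := by
  suffices h : ∀ (s : Int),
      (((PySem.List.enumerate mtr s).flatMap
          (fun p => (PySem.List.enumerate p.2).map (fun q => ((p.1, q.1), q.2)))).filter
        (fun pv => pal pv.2)).map (·.2)
      = mtr.flatMap (fun row => row.filter (fun v => pal v)) from h 0
  induction mtr with
  | nil => intro s; simp [PySem.List.enumerate_nil]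
  | cons row mtr ih =>
    intro s
    simp only [PySem.List.enumerate_cons, List.flatMap_cons, List.filter_append, List.map_append, ih]
    congr 1
    rw [List.filter_map, List.map_map]
    exact pv_enum_filter_map_snd (fun v => pal v) row 0
  
lemma pv_poss_bridge (mtr : List (List Int)) (M : Int) :
    pvPos (pvL mtr) M
      = (PySem.List.enumerate mtr).flatMap (fun p =>
          ((PySem.List.enumerate p.2).filter
              (fun q => pal q.2 && q.2 == M)).map
            (fun q => (p.1, q.1))) := by
  suffices h : ∀ (s : Int),
      ((((PySem.List.enumerate mtr s).flatMap
          (fun p => (PySem.List.enumerate p.2).map (fun q => ((p.1, q.1), q.2)))).filter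
        (fun pv => pal pv.2 && pv.2 == M)).map (·.1))
      = (PySem.List.enumerate mtr s).flatMap (fun p =>
          ((PySem.List.enumerate p.2).filter
              (fun q => pal q.2 && q.2 == M)).map
            (fun q => (p.1, q.1))) from h 0
  induction mtr with
  | nil => intro s; simp [PySem.List.enumerate_nil]
  | cons row mtr ih =>
    intro s
    simp only [PySem.List.enumerate_cons, List.flatMap_cons, List.filter_append, List.map_append, ih]
    congr 1
    rw [List.filter_map, List.map_map]
    rfl

lemma pv_max_eq (mtr : List (List Int)) :
    pvMax (pvL mtr) (-1)
      = (mtr.flatMap (fun row => row.filter (fun v => tn (PySem.Int.toStr v)))).foldl max (-1) := by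
  have h1 : pvMax (pvL mtr) (-1)
      = (((pvL mtr).filter (fun pv => pal pv.2)).map (·.2)).foldl max (-1) := by
    rw [pvMax, PySem.List.foldl_if_eq_foldl_filter, List.foldl_map]
  rw [h1, pv_vals_bridge]
  rfl

-- ===== VERDICT (by name: the statement is the Claim_ definition above) =====
theorem find_max_r_spec : Claim_equal_find_max_r := by
  intro mtr _
  show find_max_r mtr = find_max_r_alt mtr
  rw [pv_bridgeA, pv_loop]
  unfold find_max_r_alt
  simp only [PySem.List.max?_id_cons, Option.getD_some]
  rw [← pv_max_eq mtr, ite_self, List.nil_append, pv_poss_bridge]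
  rfl
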